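-- pv_equiv track=rewrite | github.com/Potterhead007/aether-band-engine | src/aether/knowledge/theory.py | create_motif_variation
-- ===== SOURCE A (Python) =====
-- from typing import Optional
--
-- def invert_melody(melody_midi: list[int], axis: Optional[int] = None) -> list[int]:
--     """
--     Invert a melody around an axis note.
--     If no axis given, uses the first note.
--     """
--     if not melody_midi:
--         return []
--
--     if axis is None:
--         axis = melody_midi[0]
--
--     return [axis - (n - axis) for n in melody_midi]
--
-- def retrograde_melody(melody_midi: list[int]) -> list[int]:
--     """Reverse a melody (play backwards)."""
--     return list(reversed(melody_midi))
--
-- def create_motif_variation(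
--     motif_midi: list[int],
--     variation_type: str,
--     scale_root: int = 60,
--     scale_type: str = "major"
-- ) -> list[int]:
--     """
--     Create a variation of a melodic motif.
--
--     Variation types:
--     - transpose: move to different pitch level
--     - invert: mirror around axis
--     - retrograde: play backwards
--     - augment_interval: stretch intervals
--     - contract_interval: shrink intervals
--     - change_octave: move octave
--     """
--     if not motif_midi:
--         return []
--
--     if variation_type == "transpose":
--         # Transpose up a third
--         return [n + 3 for n in motif_midi]
--
--     elif variation_type == "invert":
--         return invert_melody(motif_midi)
--
--     elif variation_type == "retrograde":
--         return retrograde_melody(motif_midi)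
--
--     elif variation_type == "augment_interval":
--         # Double all intervals
--         result = [motif_midi[0]]
--         for i in range(1, len(motif_midi)):
--             interval = motif_midi[i] - motif_midi[i-1]
--             result.append(result[-1] + interval * 2)
--         return result
--
--     elif variation_type == "contract_interval":
--         # Halve all intervals
--         result = [motif_midi[0]]
--         for i in range(1, len(motif_midi)):
--             interval = motif_midi[i] - motif_midi[i-1]
--             result.append(result[-1] + interval // 2)
--         return result
--
--     elif variation_type == "change_octave":
--         return [n + 12 for n in motif_midi]
--
--     return motif_midi
-- ===== SOURCE B (Python) =====
-- def create_motif_variation(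
--     motif_midi: list[int],
--     variation_type: str,
--     scale_root: int = 60,
--     scale_type: str = "major"
-- ) -> list[int]:
--     if not motif_midi:
--         return []
--     first = motif_midi[0]
--     if variation_type == "transpose":
--         return [n + 3 for n in motif_midi]
--     if variation_type == "invert":
--         return [2 * first - n for n in motif_midi]
--     if variation_type == "retrograde":
--         return list(reversed(motif_midi))
--     if variation_type == "augment_interval":
--         # doubling every interval keeps result[i] = 2*m[i] - m[0]: closed form
--         return [2 * n - first for n in motif_midi]
--     if variation_type == "contract_interval":
--         out = [first]
--         acc = first
--         for prev, cur in zip(motif_midi, motif_midi[1:]):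
--             acc += (cur - prev) // 2
--             out.append(acc)
--         return out
--     if variation_type == "change_octave":
--         return [n + 12 for n in motif_midi]
--     return list(motif_midi)
-- ===== Notes on version B (the rewrite author's own statement) =====
-- stated objective: simpler
-- what changed: The augment_interval branch's data-dependent accumulation loop (each step adds twice the previous interval to the running last element) is replaced by its closed form, an independent elementwise map n -> 2*n - motif_midi[0]; the invert branch is inlined to the same map shape, and contract_interval iterates over adjacent pairs via zip with a running accumulator instead of indexing with result[-1].
import Mathlib
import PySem

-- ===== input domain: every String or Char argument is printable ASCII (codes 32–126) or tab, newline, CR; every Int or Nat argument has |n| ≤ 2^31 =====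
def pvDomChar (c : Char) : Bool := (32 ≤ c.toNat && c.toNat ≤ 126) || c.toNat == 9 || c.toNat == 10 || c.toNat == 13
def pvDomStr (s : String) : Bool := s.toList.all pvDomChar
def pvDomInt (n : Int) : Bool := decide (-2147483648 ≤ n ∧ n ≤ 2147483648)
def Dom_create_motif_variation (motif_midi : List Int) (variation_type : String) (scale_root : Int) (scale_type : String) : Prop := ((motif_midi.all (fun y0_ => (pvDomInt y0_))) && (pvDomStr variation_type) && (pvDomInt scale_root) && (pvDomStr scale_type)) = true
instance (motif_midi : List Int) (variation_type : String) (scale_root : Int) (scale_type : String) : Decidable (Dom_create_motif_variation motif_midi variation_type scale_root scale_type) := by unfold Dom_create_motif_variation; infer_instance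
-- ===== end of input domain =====

-- B replaces augment_interval's running-last-element loop by the closed-form map n ↦ 2n − m₀,
-- inlines invert to the same map shape, and drives contract_interval by a zip over adjacent
-- pairs with a scalar accumulator (objective: simpler).

-- ===== PORT A =====
def invert_melody (melody_midi : List Int) (axis : Option Int) : List Int :=
  if melody_midi = [] then []
  else
    let a := match axis with
      | none => PySem.List.pyGetD melody_midi 0 0
      | some x => x
    melody_midi.map (fun n => a - (n - a))

def retrograde_melody (melody_midi : List Int) : List Int := melody_midi.reverse

def create_motif_variation (motif_midi : List Int) (variation_type : String) (scale_root : Int) (scale_type : String) : List Int :=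
  if motif_midi = [] then []
  else if variation_type = "transpose" then motif_midi.map (fun n => n + 3)
  else if variation_type = "invert" then invert_melody motif_midi none
  else if variation_type = "retrograde" then retrograde_melody motif_midi
  else if variation_type = "augment_interval" then
    (PySem.List.pyRange 1 (motif_midi.length : Int)).foldl
      (fun result i => result ++
        [PySem.List.pyGetD result (-1) 0 +
          (PySem.List.pyGetD motif_midi i 0 - PySem.List.pyGetD motif_midi (i - 1) 0) * 2])
      [PySem.List.pyGetD motif_midi 0 0]
  else if variation_type = "contract_interval" then
    (PySem.List.pyRange 1 (motif_midi.length : Int)).foldl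
      (fun result i => result ++
        [PySem.List.pyGetD result (-1) 0 +
          PySem.Int.floordiv
            (PySem.List.pyGetD motif_midi i 0 - PySem.List.pyGetD motif_midi (i - 1) 0) 2])
      [PySem.List.pyGetD motif_midi 0 0]
  else if variation_type = "change_octave" then motif_midi.map (fun n => n + 12)
  else motif_midi

-- ===== PORT B =====
def create_motif_variation_alt (motif_midi : List Int) (variation_type : String) (scale_root : Int) (scale_type : String) : List Int :=
  match motif_midi with
  | [] => []
  | first :: _ =>
    if variation_type = "transpose" then motif_midi.map (fun n => n + 3)
    else if variation_type = "invert" then motif_midi.map (fun n => 2 * first - n)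
    else if variation_type = "retrograde" then motif_midi.reverse
    else if variation_type = "augment_interval" then motif_midi.map (fun n => 2 * n - first)
    else if variation_type = "contract_interval" then
      ((motif_midi.zip motif_midi.tail).foldl
        (fun (st : List Int × Int) pc =>
          (st.1 ++ [st.2 + PySem.Int.floordiv (pc.2 - pc.1) 2],
           st.2 + PySem.Int.floordiv (pc.2 - pc.1) 2))
        ([first], first)).1
    else if variation_type = "change_octave" then motif_midi.map (fun n => n + 12)
    else motif_midi

-- ===== PRECONDITION & SPEC =====
def Spec_create_motif_variation (motif_midi : List Int) (variation_type : String) (scale_root : Int) (scale_type : String) (out : List Int) : Prop := out = create_motif_variation_alt motif_midi variation_type scale_root scale_type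
instance (motif_midi : List Int) (variation_type : String) (scale_root : Int) (scale_type : String) (out : List Int) : Decidable (Spec_create_motif_variation motif_midi variation_type scale_root scale_type out) := by unfold Spec_create_motif_variation; infer_instance

-- ===== CLAIM (what is proved, stated in full; the proofs are below) =====
def Claim_equal_create_motif_variation : Prop := ∀ (motif_midi : List Int) (variation_type : String) (scale_root : Int) (scale_type : String), Dom_create_motif_variation motif_midi variation_type scale_root scale_type → Spec_create_motif_variation motif_midi variation_type scale_root scale_type (create_motif_variation motif_midi variation_type scale_root scale_type)

-- ===== LEMMAS AND PROOFS =====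

-- the value sequence produced by A's interval loops, as a structural scan over the tail
def gScan (g : Int → Int) (prev acc : Int) : List Int → List Int
  | [] => []
  | x :: t => (acc + g (x - prev)) :: gScan g x (acc + g (x - prev)) t

theorem gScan_append (g : Int → Int) (prev acc : Int) (t : List Int) (x : Int) :
    gScan g prev acc (t ++ [x]) =
      gScan g prev acc t ++
        [(gScan g prev acc t).getLastD acc + g (x - (prev :: t).getLast (by simp))] := by
  induction t generalizing prev acc with
  | nil => simp [gScan]
  | cons y t ih =>
      simp only [List.cons_append, gScan, ih y (acc + g (y - prev))]
      simp only [List.append_cancel_left_eq, List.cons.injEq, and_true]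
      cases hgs : gScan g y (acc + g (y - prev)) t <;>
        simp [List.getLastD, List.getLast_cons]

-- A's index-driven loop (either branch, g the interval transform) equals the scan
theorem aloop_eq_gScan (g : Int → Int) (m0 : Int) (t : List Int) :
    (PySem.List.pyRange 1 (((m0 :: t).length : Int))).foldl
      (fun result i => result ++
        [PySem.List.pyGetD result (-1) 0 +
          g (PySem.List.pyGetD (m0 :: t) i 0 - PySem.List.pyGetD (m0 :: t) (i - 1) 0)])
      [PySem.List.pyGetD (m0 :: t) 0 0]
    = m0 :: gScan g m0 m0 t := by
  induction t using List.reverseRecOn with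
  | nil =>
      have h : (((m0 :: ([] : List Int)).length : Int)) = 1 := by simp
      rw [h, PySem.List.pyRange_one_eq_nil le_rfl]
      simp [gScan, PySem.List.pyGetD_zero_cons]
  | append_singleton t x ih =>
      have hlen : (((m0 :: (t ++ [x])).length : Int)) = (((m0 :: t).length : Int)) + 1 := by
        simp
      rw [hlen, PySem.List.pyRange_one_succ_right (by simp : (1:Int) ≤ ((m0 :: t).length : Int)),
          List.foldl_append]
      have hbody : ∀ (acc : List Int), ∀ i ∈ PySem.List.pyRange 1 (((m0 :: t).length : Int)),
          (fun (result : List Int) (i : Int) => result ++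
            [PySem.List.pyGetD result (-1) 0 +
              g (PySem.List.pyGetD (m0 :: (t ++ [x])) i 0 -
                 PySem.List.pyGetD (m0 :: (t ++ [x])) (i - 1) 0)]) acc i
          = (fun (result : List Int) (i : Int) => result ++
            [PySem.List.pyGetD result (-1) 0 +
              g (PySem.List.pyGetD (m0 :: t) i 0 -
                 PySem.List.pyGetD (m0 :: t) (i - 1) 0)]) acc i := by
        intro acc i hi
        rw [PySem.List.mem_pyRange_one] at hi
        have e1 : PySem.List.pyGetD (m0 :: (t ++ [x])) i 0 = PySem.List.pyGetD (m0 :: t) i 0 := by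
          rw [show i = ((i.toNat : Nat) : Int) by omega, PySem.List.pyGetD_natCast,
              PySem.List.pyGetD_natCast, List.getD_eq_getElem?_getD, List.getD_eq_getElem?_getD,
              show (m0 :: (t ++ [x])) = (m0 :: t) ++ [x] by simp,
              List.getElem?_append_left (by simp only [List.length_cons] at hi ⊢; omega)]
        have e2 : PySem.List.pyGetD (m0 :: (t ++ [x])) (i - 1) 0
            = PySem.List.pyGetD (m0 :: t) (i - 1) 0 := by
          rw [show i - 1 = (((i - 1).toNat : Nat) : Int) by omega, PySem.List.pyGetD_natCast,
              PySem.List.pyGetD_natCast, List.getD_eq_getElem?_getD, List.getD_eq_getElem?_getD,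
              show (m0 :: (t ++ [x])) = (m0 :: t) ++ [x] by simp,
              List.getElem?_append_left (by simp only [List.length_cons] at hi ⊢; omega)]
        simp only [e1, e2]
      have hinner :
          (PySem.List.pyRange 1 (((m0 :: t).length : Int))).foldl
            (fun result i => result ++
              [PySem.List.pyGetD result (-1) 0 +
                g (PySem.List.pyGetD (m0 :: (t ++ [x])) i 0 -
                   PySem.List.pyGetD (m0 :: (t ++ [x])) (i - 1) 0)])
            [PySem.List.pyGetD (m0 :: (t ++ [x])) 0 0]
          = m0 :: gScan g m0 m0 t := by
        rw [show PySem.List.pyGetD (m0 :: (t ++ [x])) 0 0 = PySem.List.pyGetD (m0 :: t) 0 0 by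
              rw [PySem.List.pyGetD_zero_cons, PySem.List.pyGetD_zero_cons]]
        exact (PySem.List.foldl_congr_mem _ _ _ _ hbody).trans ih
      rw [hinner]
      simp only [List.foldl_cons, List.foldl_nil]
      have hlast : PySem.List.pyGetD (m0 :: (t ++ [x])) (((m0 :: t).length : Int)) 0 = x := by
        rw [PySem.List.pyGetD_natCast, List.getD_eq_getElem?_getD,
            show (m0 :: (t ++ [x])) = (m0 :: t) ++ [x] by simp, List.getElem?_concat_length]
        rfl
      have hprev : PySem.List.pyGetD (m0 :: (t ++ [x])) ((((m0 :: t).length : Int)) - 1) 0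
          = (m0 :: t).getLast (by simp) := by
        rw [show (((m0 :: t).length : Int)) - 1 = ((t.length : Nat) : Int) by simp,
            PySem.List.pyGetD_natCast, List.getD_eq_getElem?_getD,
            show (m0 :: (t ++ [x])) = (m0 :: t) ++ [x] by simp,
            List.getElem?_append_left (by simp),
            List.getElem?_eq_getElem (by simp : t.length < (m0 :: t).length)]
        rw [List.getLast_eq_getElem]
        simp only [Option.getD_some, List.length_cons, Nat.add_sub_cancel]
        rfl
      have hneg : PySem.List.pyGetD (m0 :: gScan g m0 m0 t) (-1) 0
          = (gScan g m0 m0 t).getLastD m0 := by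
        rw [PySem.List.pyGetD_neg_one _ _ (by simp), List.getLast_eq_getLastD]
      rw [hlast, hprev, hneg, gScan_append]
      simp
-- closed form of the augment scan: with acc = 2·prev − m0 invariant it is the map n ↦ 2n − m0
theorem gScan_double (m0 : Int) : ∀ (t : List Int) (prev acc : Int), acc = 2 * prev - m0 →
    gScan (fun d => d * 2) prev acc t = t.map (fun n => 2 * n - m0) := by
  intro t
  induction t with
  | nil => intro prev acc _; rfl
  | cons x t ih =>
      intro prev acc h
      simp only [gScan, List.map_cons, List.cons.injEq]
      exact ⟨by omega, ih x _ (by omega)⟩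

-- B's zip fold accumulates exactly the contract scan
theorem zipfold_eq_gScan : ∀ (l : List Int) (prev acc : Int) (pre : List Int),
    (((prev :: l).zip l).foldl
      (fun (st : List Int × Int) pc =>
        (st.1 ++ [st.2 + PySem.Int.floordiv (pc.2 - pc.1) 2],
         st.2 + PySem.Int.floordiv (pc.2 - pc.1) 2))
      (pre, acc)).1
    = pre ++ gScan (fun d => PySem.Int.floordiv d 2) prev acc l := by
  intro l
  induction l with
  | nil => intro prev acc pre; simp [gScan]
  | cons x t ih =>
      intro prev acc pre
      simp only [List.zip_cons_cons, List.foldl_cons, gScan]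
      rw [ih x (acc + PySem.Int.floordiv (x - prev) 2)
            (pre ++ [acc + PySem.Int.floordiv (x - prev) 2])]
      simp

-- ===== VERDICT (by name: the statement is the Claim_ definition above) =====
theorem create_motif_variation_spec : Claim_equal_create_motif_variation := by
  intro m vt sr st _
  unfold Spec_create_motif_variation create_motif_variation create_motif_variation_alt
  cases m with
  | nil => simp
  | cons m0 t =>
      rw [if_neg (by simp : ¬ (m0 :: t = []))]
      by_cases h1 : vt = "transpose"
      · simp [h1]
      simp only [if_neg h1]
      by_cases h2 : vt = "invert"
      · simp only [if_pos h2]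
        show invert_melody (m0 :: t) none = _
        rw [invert_melody, if_neg (by simp : ¬ (m0 :: t = []))]
        simp only [PySem.List.pyGetD_zero_cons]
        exact List.map_congr_left (fun n _ => by omega)
      simp only [if_neg h2]
      by_cases h3 : vt = "retrograde"
      · simp only [if_pos h3]; rfl
      simp only [if_neg h3]
      by_cases h4 : vt = "augment_interval"
      · simp only [if_pos h4]
        rw [aloop_eq_gScan (fun d => d * 2) m0 t,
            gScan_double m0 t m0 m0 (by omega)]
        simp only [List.map_cons, List.cons.injEq]
        exact ⟨by omega, trivial⟩
      simp only [if_neg h4]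
      by_cases h5 : vt = "contract_interval"
      · simp only [if_pos h5, List.tail_cons]
        rw [aloop_eq_gScan (fun d => PySem.Int.floordiv d 2) m0 t,
            zipfold_eq_gScan t m0 m0 [m0]]
        rfl
      simp only [if_neg h5]
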